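-- pv_equiv track=rewrite | github.com/agrimsingh/fbhacksg | Parser/parser.py | reverseFreqs
-- ===== SOURCE A (Python) =====
-- def reverseFreqs(freqs):
-- 	length = 0
-- 	for key in freqs:
-- 		val = freqs[key]
-- 		length = max(val, length)
--
-- 	rev = [0]*(length+1)
-- 	for i in range(0, length+1):
-- 		rev[i] = []
--
-- 	for key in freqs:
-- 		rev[freqs[key]].append(key)
--
-- 	return rev
-- ===== SOURCE B (Python) =====
-- def reverseFreqs(freqs):
-- 	length = max(list(freqs.values()) + [0])
-- 	return [[k for k, v in freqs.items() if v == i] for i in range(length + 1)]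
-- ===== Notes on version B (the rewrite author's own statement) =====
-- stated objective: idiomatic
-- what changed: Replaces A's allocate-then-append single pass (pre-sized bucket list mutated by indexed appends) with a list comprehension over the frequency range that rescans the dict once per bucket; Pre_ restricts to the natural domain of non-negative frequency counts, since on a negative value A either raises IndexError or silently wraps via negative list indexing, which B's comprehension does not mirror.
-- outside the precondition, e.g. on reverseFreqs({'a': 2, 'b': -1}): A returns [[], [], ['a', 'b']], B returns [[], [], ['a']]
import Mathlib
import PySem

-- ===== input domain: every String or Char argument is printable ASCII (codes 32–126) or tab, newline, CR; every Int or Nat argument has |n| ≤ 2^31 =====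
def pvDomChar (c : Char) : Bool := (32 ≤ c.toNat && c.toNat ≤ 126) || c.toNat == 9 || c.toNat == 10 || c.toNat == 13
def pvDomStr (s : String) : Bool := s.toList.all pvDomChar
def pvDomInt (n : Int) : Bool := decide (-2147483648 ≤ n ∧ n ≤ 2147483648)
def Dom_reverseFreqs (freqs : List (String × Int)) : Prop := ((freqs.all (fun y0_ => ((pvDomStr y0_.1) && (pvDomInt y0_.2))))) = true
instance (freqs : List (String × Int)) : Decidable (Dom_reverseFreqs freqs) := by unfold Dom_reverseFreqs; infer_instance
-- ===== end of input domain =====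

-- B rebuilds the buckets by a comprehension over the frequency range (one rescan of the
-- dict per bucket) instead of A's allocate-then-append indexed mutation; objective: idiomatic.

-- ===== PORT A =====
-- Python's `rev = [0]*(length+1)` followed by the loop writing `rev[i] = []` into every
-- slot cannot be typed directly (int placeholders in a list of lists); since every slot is
-- overwritten, the two lines amount to a list of (length+1) empty lists, ported as such.
def reverseFreqs (freqs : List (String × Int)) : List (List String) :=
  let length := freqs.foldl (fun l p => max p.2 l) 0
  let rev : List (List String) := (PySem.List.pyRange 0 (length + 1) 1).map (fun _ => [])
  freqs.foldl (fun rev p => PySem.List.pySetD rev p.2 (PySem.List.pyGetD rev p.2 [] ++ [p.1])) rev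

-- ===== PORT B =====
def reverseFreqs_alt (freqs : List (String × Int)) : List (List String) :=
  let length := PySem.List.maxD (freqs.map (fun p => p.2) ++ [0]) (fun x => x) 0
  (PySem.List.pyRange 0 (length + 1) 1).map
    (fun i => (freqs.filter (fun p => p.2 == i)).map (fun p => p.1))

-- ===== PRECONDITION & SPEC =====
-- Pre_ restricts to the function's natural domain of non-negative frequency counts: on a
-- dict containing a negative value A either raises IndexError (value below -(max+1)) or
-- silently wraps it into a bucket via negative list indexing, an artefact of A's list
-- indexing that B's comprehension does not mirror (B drops such values).
def Pre_reverseFreqs (freqs : List (String × Int)) : Prop :=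
  ∀ p ∈ freqs, 0 ≤ p.2
instance (freqs : List (String × Int)) : Decidable (Pre_reverseFreqs freqs) := by
  unfold Pre_reverseFreqs; infer_instance
def pvWitness_reverseFreqs : (List (String × Int)) := [("a", 1)]

def Spec_reverseFreqs (freqs : List (String × Int)) (out : List (List String)) : Prop :=
  out = reverseFreqs_alt freqs
instance (freqs : List (String × Int)) (out : List (List String)) : Decidable (Spec_reverseFreqs freqs out) := by unfold Spec_reverseFreqs; infer_instance

-- ===== CLAIM (what is proved, stated in full; the proofs are below) =====
def Claim_equal_reverseFreqs : Prop := ∀ (freqs : List (String × Int)), Dom_reverseFreqs freqs → Pre_reverseFreqs freqs → Spec_reverseFreqs freqs (reverseFreqs freqs)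

-- ===== LEMMAS AND PROOFS =====

-- pushing a new max candidate through a running max
lemma foldl_max_shift (t : List Int) (a b : Int) :
    t.foldl max (max a b) = max (t.foldl max a) b := by
  induction t generalizing a with
  | nil => rfl
  | cons x t ih =>
      simp only [List.foldl_cons]
      rw [show max (max a b) x = max (max a x) b by
            rcases le_total a b with h | h <;> rcases le_total a x with h' | h' <;>
              rcases le_total b x with h'' | h'' <;> simp [max_def] <;> omega,
          ih]

-- A's running-max loop is the running max of the projected value list
lemma foldl_max_map (freqs : List (String × Int)) (a : Int) :
    freqs.foldl (fun l p => max p.2 l) a = (freqs.map (fun p => p.2)).foldl max a := by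
  induction freqs generalizing a with
  | nil => rfl
  | cons q t ih =>
      simp only [List.foldl_cons, List.map_cons]
      rw [max_comm q.2 a]
      exact ih _

-- A's running-max loop equals the max of the value list extended with 0 (B's length)
lemma length_eq (freqs : List (String × Int)) :
    freqs.foldl (fun l p => max p.2 l) 0
      = PySem.List.maxD (freqs.map (fun p => p.2) ++ [0]) (fun x => x) 0 := by
  rw [foldl_max_map]
  cases hxs : freqs.map (fun p => p.2) with
  | nil => simp only [PySem.List.maxD, List.nil_append]; decide
  | cons x t =>
      simp only [PySem.List.maxD, List.cons_append, PySem.List.max?_id_cons,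
        Option.getD_some]
      rw [List.foldl_append]
      simp only [List.foldl_cons, List.foldl_nil]
      rw [← foldl_max_shift]
      rw [show max 0 x = max x 0 from max_comm 0 x, foldl_max_shift,
        ← foldl_max_shift t x 0]

-- invariant of the append loop: bucket j ends as its start value plus the keys whose value is j
lemma foldl_step_getElem (d : List (String × Int)) (rev : List (List String))
    (h : ∀ p ∈ d, 0 ≤ p.2 ∧ p.2.toNat < rev.length) (j : Nat) :
    (d.foldl (fun rev p =>
        PySem.List.pySetD rev p.2 (PySem.List.pyGetD rev p.2 [] ++ [p.1])) rev)[j]?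
      = (rev[j]?).map (fun b => b ++ (d.filter (fun p => p.2 == (j : Int))).map (fun p => p.1)) := by
  induction d generalizing rev with
  | nil => simp
  | cons q d ih =>
      have hq := h q (List.mem_cons_self ..)
      obtain ⟨hq0, hqlt⟩ := hq
      have hset : PySem.List.pySetD rev q.2 (PySem.List.pyGetD rev q.2 [] ++ [q.1])
          = rev.set q.2.toNat (rev[q.2.toNat]'hqlt ++ [q.1]) := by
        rw [PySem.List.pySetD_of_nonneg _ _ hq0,
          PySem.List.pyGetD_eq_getElem _ _ hq0 (by omega)]
      simp only [List.foldl_cons, hset]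
      rw [ih _ (fun p hp => by
            have := h p (List.mem_cons_of_mem _ hp)
            simpa [List.length_set] using this)]
      by_cases hcase : q.2 = (j : Int)
      · have hjq : q.2.toNat = j := by omega
        subst hjq
        rw [List.getElem?_set]
        simp [hqlt, List.filter_cons]
        rw [if_pos hq0]
        simp
      · have hjq : q.2.toNat ≠ j := by
          intro hEq; exact hcase (by omega)
        rw [List.getElem?_set]
        have hbeq : (q.2 == ((j : Nat) : Int)) = false := by
          simpa using hcase
        simp [hjq, hbeq]

-- ===== VERDICT (by name: the statement is the Claim_ definition above) =====
theorem reverseFreqs_spec : Claim_equal_reverseFreqs := by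
  intro freqs _ hpre
  unfold Spec_reverseFreqs reverseFreqs reverseFreqs_alt
  simp only [← length_eq freqs]
  set L := freqs.foldl (fun l p => max p.2 l) 0 with hL
  have hLmap : L = (freqs.map (fun p => p.2)).foldl max 0 := foldl_max_map freqs 0
  obtain ⟨h0L, hallL⟩ := PySem.List.le_foldl_max (freqs.map (fun p => p.2)) 0
  have h0 : 0 ≤ L := by rw [hLmap]; exact h0L
  have hub : ∀ p ∈ freqs, p.2 ≤ L := fun p hp => by
    rw [hLmap]; exact hallL p.2 (List.mem_map_of_mem hp)
  have hrevlen : ((PySem.List.pyRange 0 (L + 1) 1).map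
      (fun _ => ([] : List String))).length = (L + 1).toNat := by
    simp [PySem.List.length_pyRange_one]
  apply List.ext_getElem?
  intro j
  rw [foldl_step_getElem _ _ (fun p hp => by
        have h1 := hpre p hp
        have h2 := hub p hp
        exact ⟨h1, by rw [hrevlen]; omega⟩)]
  by_cases hjL : j < (L + 1).toNat
  · have hr : j < (PySem.List.pyRange 0 (L + 1) 1).length := by
      simpa [PySem.List.length_pyRange_one] using hjL
    rw [List.getElem?_map, List.getElem?_map,
      List.getElem?_eq_getElem hr]
    simp [PySem.List.getElem_pyRange_one]
  · have hr : ¬ j < (PySem.List.pyRange 0 (L + 1) 1).length := by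
      simpa [PySem.List.length_pyRange_one] using hjL
    rw [List.getElem?_map, List.getElem?_map,
      List.getElem?_eq_none (by omega)]
    simp
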